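-- pv_equiv track=rewrite | github.com/aimin-tang/comp_programming | usaco/2020/b2_mad_sci.py | sub_solve
-- ===== SOURCE A (Python) =====
-- def flip_it(s):
--     result = []
--     for l in s:
--         if l == 'G':
--             result.append('H')
--         else:
--             result.append('G')
--
--     return result
--
-- def sub_solve(a, b):
--     # solve for a and b
--     start, end = 0, len(a) - 1
--
--     # find first place of mismatch
--     for i in range(len(a)):
--         if a[i] != b[i]:
--             start = i
--             break
--     else:
--         # all are same
--         return 0
--
--     # find last place of mismatch
--     for i in range(len(a) - 1, start - 1, -1):
--         if a[i] != b[i]: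
--             end = i
--             break
--
--     if end - start < 2:
--         return 1
--
--     shorter_a = a[start: end+1]
--     shorter_b = b[start: end+1]
--
--     return sub_solve(shorter_a, flip_it(shorter_b)) + 1
-- ===== SOURCE B (Python) =====
-- def sub_solve(a, b):
--     # single linear pass: answer = number of maximal runs of mismatching positions
--     runs = 0
--     prev = False
--     for x, y in zip(a, b):
--         m = (x != y)
--         if m and not prev:
--             runs += 1
--         prev = m
--     return runs
-- ===== Notes on version B (the rewrite author's own statement) =====
-- stated objective: simpler
-- what changed: Replaced A's recursive shrink-window-and-flip scheme (each level rescans and slices the strings) by one linear pass that counts maximal runs of mismatching positions, which equals A's answer on Pre_.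
-- outside the precondition, e.g. on sub_solve(['G', 'G', 'H'], ['H', 'H', 'X']): A returns 2, B returns 1
import Mathlib
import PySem

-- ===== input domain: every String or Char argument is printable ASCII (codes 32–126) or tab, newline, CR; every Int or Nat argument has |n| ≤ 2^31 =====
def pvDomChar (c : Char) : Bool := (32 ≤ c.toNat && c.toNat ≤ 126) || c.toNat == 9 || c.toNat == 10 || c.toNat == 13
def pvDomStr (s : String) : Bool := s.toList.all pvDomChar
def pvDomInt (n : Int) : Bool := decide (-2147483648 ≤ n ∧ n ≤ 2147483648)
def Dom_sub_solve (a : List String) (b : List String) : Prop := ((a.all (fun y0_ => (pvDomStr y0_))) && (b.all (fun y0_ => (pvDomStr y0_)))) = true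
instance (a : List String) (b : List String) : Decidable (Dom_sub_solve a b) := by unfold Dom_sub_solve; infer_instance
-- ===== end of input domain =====

-- B replaces A's recursive shrink-window-and-flip scheme by a single pass that counts
-- maximal runs of mismatching positions (objective: simpler).

-- ===== PORT A =====
-- flip_it: the for-loop appending 'H' for 'G' and 'G' otherwise
def flip_it (s : List String) : List String :=
  s.foldl (fun result l => result ++ [if l == "G" then "H" else "G"]) []

-- a[i] != b[i] (pyGet?: none = IndexError; only queried at 0 ≤ i < len(a) as in Python)
def pvMM (a b : List String) (i : Nat) : Bool :=
  !(PySem.List.pyGet? a (i : Int) == PySem.List.pyGet? b (i : Int))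

-- 'for i in range(len(a)): if a[i] != b[i]: start = i; break  else: return 0'
def pvFindUp (a b : List String) (i : Nat) : Option Nat :=
  if i < a.length then
    if pvMM a b i then some i else pvFindUp a b (i + 1)
  else none
termination_by a.length - i

-- 'for i in range(len(a)-1, start-1, -1): if a[i] != b[i]: end = i; break'
def pvFindDown (a b : List String) (i lo : Nat) : Option Nat :=
  if i < lo then none
  else if pvMM a b i then some i
  else if i = lo then none
  else pvFindDown a b (i - 1) lo
termination_by i

-- the recursion of sub_solve, with fuel (len(a)+1 levels always suffice on Pre_)
def subSolveFuel : Nat → List String → List String → Int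
  | 0, _, _ => 0
  | fuel + 1, a, b =>
    match pvFindUp a b 0 with
    | none => 0
    | some start =>
      let e := (pvFindDown a b (a.length - 1) start).getD (a.length - 1)
      if (e : Int) - (start : Int) < 2 then 1
      else
        subSolveFuel fuel
          (PySem.List.slice a (some (start : Int)) (some ((e : Int) + 1)))
          (flip_it (PySem.List.slice b (some (start : Int)) (some ((e : Int) + 1)))) + 1

def sub_solve (a : List String) (b : List String) : Int :=
  subSolveFuel (a.length + 1) a b

-- ===== PORT B =====
def sub_solve_alt (a : List String) (b : List String) : Int :=
  ((a.zip b).foldl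
    (fun (st : Int × Bool) (p : String × String) =>
      let m : Bool := !(p.1 == p.2)
      (if m && !st.2 then st.1 + 1 else st.1, m))
    (0, false)).1

-- ===== PRECONDITION & SPEC =====
-- Pre_ excludes inputs where a is longer than b (A raises IndexError there) and inputs that
-- both contain strings outside the G/H alphabet and have differences spread wider than a
-- window of 2: on those, flip_it's catch-all else-branch makes A's recursion accidental —
-- A then returns inflated counts or recurses forever.
def Pre_sub_solve (a : List String) (b : List String) : Prop :=
  a.length ≤ b.length ∧
    ((∀ s ∈ a, s = "G" ∨ s = "H") ∧ (∀ s ∈ b.take a.length, s = "G" ∨ s = "H")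
      ∨ (∃ w, w ≤ a.length ∧ ∀ i, i < a.length → a[i]? ≠ b[i]? → (w ≤ i ∧ i ≤ w + 1)))
instance (a : List String) (b : List String) : Decidable (Pre_sub_solve a b) := by
  unfold Pre_sub_solve; infer_instance

def pvWitness_sub_solve : List String × List String := (["G", "H", "G", "G"], ["G", "G", "G", "H"])

def Spec_sub_solve (a : List String) (b : List String) (out : Int) : Prop := out = sub_solve_alt a b
instance (a : List String) (b : List String) (out : Int) : Decidable (Spec_sub_solve a b out) := by
  unfold Spec_sub_solve; infer_instance

-- ===== CLAIM (what is proved, stated in full; the proofs are below) =====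
def Claim_equal_sub_solve : Prop := ∀ (a : List String) (b : List String), Dom_sub_solve a b → Pre_sub_solve a b → Spec_sub_solve a b (sub_solve a b)

-- ===== LEMMAS AND PROOFS =====

-- mismatch indicator list and run counter
def mismL (a b : List String) : List Bool := List.zipWith (fun x y => !(x == y)) a b

def runsAux : List Bool → Bool → Nat
  | [], _ => 0
  | x :: t, p => (if x && !p then 1 else 0) + runsAux t x

def nruns (m : List Bool) : Nat := runsAux m false


-- pvMM in terms of the mismatch list
lemma mm_getD (a b : List String) (i : Nat) (hi : i < a.length) (hib : i < b.length) :
    pvMM a b i = (mismL a b).getD i false := by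
  have hm : i < (mismL a b).length := by
    simpa [mismL, List.length_zipWith] using ⟨hi, hib⟩
  rw [List.getD_eq_getElem _ _ hm]
  simp [pvMM, mismL, hi, hib]

lemma mm_ne (a b : List String) (i : Nat) : pvMM a b i = true ↔ a[i]? ≠ b[i]? := by
  simp [pvMM]

-- pvFindUp specification
lemma up_none (a b : List String) (i : Nat) (h : pvFindUp a b i = none) :
    ∀ j, i ≤ j → j < a.length → pvMM a b j = false := by
  fun_induction pvFindUp a b i with
  | case1 => simp at h
  | case2 =>
    rename_i i hlt hmm ih
    intro j hij hjl
    rcases Nat.eq_or_lt_of_le hij with rfl | hlt'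
    · simpa using hmm
    · exact ih h j hlt' hjl
  | case3 => rename_i i hge; intro j hij hjl; omega

lemma up_some (a b : List String) (i s : Nat) (h : pvFindUp a b i = some s) :
    i ≤ s ∧ s < a.length ∧ pvMM a b s = true ∧ ∀ j, i ≤ j → j < s → pvMM a b j = false := by
  fun_induction pvFindUp a b i with
  | case1 =>
    rename_i i hlt hmm
    simp at h; subst h
    exact ⟨le_refl _, hlt, hmm, fun j h1 h2 => absurd h1 (by omega)⟩
  | case2 =>
    rename_i i hlt hmm ih
    obtain ⟨h1, h2, h3, h4⟩ := ih h
    refine ⟨by omega, h2, h3, fun j hij hjs => ?_⟩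
    rcases Nat.eq_or_lt_of_le hij with rfl | hlt'
    · simpa using hmm
    · exact h4 j hlt' hjs
  | case3 => simp at h

-- pvFindDown specification
lemma down_some (a b : List String) (i lo e : Nat) (h : pvFindDown a b i lo = some e) :
    lo ≤ e ∧ e ≤ i ∧ pvMM a b e = true ∧ ∀ j, e < j → j ≤ i → pvMM a b j = false := by
  fun_induction pvFindDown a b i lo with
  | case1 => simp at h
  | case2 =>
    rename_i i hlt hmm
    simp at h; subst h
    exact ⟨by omega, le_refl _, hmm, fun j h1 h2 => absurd h1 (by omega)⟩
  | case3 => simp at h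
  | case4 =>
    rename_i i hlt hmm hne ih
    obtain ⟨h1, h2, h3, h4⟩ := ih h
    refine ⟨h1, by omega, h3, fun j hej hji => ?_⟩
    rcases Nat.eq_or_lt_of_le hji with rfl | hlt'
    · simpa using hmm
    · exact h4 j hej (by omega)

lemma down_none (a b : List String) (i lo : Nat) (h : pvFindDown a b i lo = none) :
    ∀ j, lo ≤ j → j ≤ i → pvMM a b j = false := by
  fun_induction pvFindDown a b i lo with
  | case1 => rename_i i hlt; intro j h1 h2; omega
  | case2 => simp at h
  | case3 =>
    rename_i hlt hmm
    intro j h1 h2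
    have : j = lo := by omega
    subst this; simpa using hmm
  | case4 =>
    rename_i i hlt hmm hne ih
    intro j h1 h2
    rcases Nat.eq_or_lt_of_le h2 with rfl | hlt'
    · simpa using hmm
    · exact ih h j h1 (by omega)

-- run-counter facts
lemma runsAux_le_length (l : List Bool) : ∀ p, runsAux l p ≤ l.length := by
  induction l with
  | nil => intro p; simp [runsAux]
  | cons x t ih =>
    intro p
    have := ih x
    simp only [runsAux, List.length_cons]
    split <;> omega
lemma runsAux_allfalse (l : List Bool) (h : ∀ x ∈ l, x = false) : ∀ p, runsAux l p = 0 := by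
  induction l with
  | nil => intro p; simp [runsAux]
  | cons x t ih =>
    intro p
    have hx : x = false := h x (by simp)
    subst hx
    simp [runsAux, ih (fun y hy => h y (by simp [hy]))]
lemma runsAux_append (s t : List Bool) : ∀ p, runsAux (s ++ t) p = runsAux s p + runsAux t (s.getLastD p) := by
  induction s with
  | nil => intro p; simp [runsAux]
  | cons x s ih =>
    intro p
    simp only [List.cons_append, runsAux, ih x, List.getLastD_cons]
    omega
lemma runsAux_prefix_false (pfx r : List Bool) (h : ∀ x ∈ pfx, x = false) :
    runsAux (pfx ++ r) false = runsAux r false := by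
  induction pfx with
  | nil => simp
  | cons x t ih =>
    have hx : x = false := h x (by simp)
    subst hx
    simp only [List.cons_append, runsAux]
    simpa using ih (fun y hy => h y (by simp [hy]))
lemma runsAux_flip (l : List Bool) : ∀ p,
    runsAux l p + (if p then 1 else 0)
      = runsAux (l.map (!·)) (!p) + (if l.getLastD p then 1 else 0) := by
  induction l with
  | nil => intro p; simp [runsAux]
  | cons x t ih =>
    intro p
    have hih := ih x
    simp only [List.map_cons, runsAux, List.getLastD_cons]
    cases x <;> cases p <;> simp_all <;> omega
lemma nruns_flip (w : List Bool) (hh : w.getD 0 false = true) (hl : w.getLastD false = true) :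
    nruns w = nruns (w.map (!·)) + 1 := by
  obtain ⟨t, rfl⟩ : ∃ t, w = true :: t := by
    cases w with
    | nil => simp at hh
    | cons x t =>
      cases x
      · simp at hh
      · exact ⟨t, rfl⟩
  have h := runsAux_flip (true :: t) false
  rw [hl] at h
  simp [nruns, runsAux] at h ⊢
  omega

-- all entries false from pointwise getD
lemma all_false_of_getD (l : List Bool) (h : ∀ j, j < l.length → l.getD j false = false) :
    ∀ x ∈ l, x = false := by
  intro x hx
  obtain ⟨j, hj, rfl⟩ := List.mem_iff_getElem.mp hx
  have := h j hj
  rwa [List.getD_eq_getElem _ _ hj] at this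

-- the run count only depends on the [s, e] window when everything outside is false
lemma nruns_window (m : List Bool) (s e : Nat) (hse : s ≤ e) (hen : e < m.length)
    (hpre : ∀ j, j < s → m.getD j false = false)
    (hpost : ∀ j, e < j → j < m.length → m.getD j false = false) :
    nruns m = nruns ((m.drop s).take (e + 1 - s)) := by
  have hdecomp : m = m.take s ++ ((m.drop s).take (e + 1 - s) ++ (m.drop s).drop (e + 1 - s)) := by
    rw [List.take_append_drop, List.take_append_drop]
  have htakef : ∀ x ∈ m.take s, x = false := by
    intro x hx
    obtain ⟨j, hj, rfl⟩ := List.mem_iff_getElem.mp hx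
    have hjs : j < s := by
      have := hj; simp [List.length_take] at this; omega
    have hjm : j < m.length := by
      have := hj; simp [List.length_take] at this; omega
    have := hpre j hjs
    rw [List.getD_eq_getElem _ _ hjm] at this
    rw [List.getElem_take] at *
    exact this
  have hdd : (m.drop s).drop (e + 1 - s) = m.drop (e + 1) := by
    rw [List.drop_drop]; congr 1; omega
  have hdropf : ∀ x ∈ (m.drop s).drop (e + 1 - s), x = false := by
    rw [hdd]
    intro x hx
    obtain ⟨j, hj, rfl⟩ := List.mem_iff_getElem.mp hx
    rw [List.getElem_drop]
    have h2 : e + 1 + j < m.length := by simp [List.length_drop] at hj; omega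
    have := hpost (e + 1 + j) (by omega) h2
    rw [List.getD_eq_getElem _ _ h2] at this
    exact this
  calc nruns m = runsAux (m.take s ++ ((m.drop s).take (e + 1 - s) ++ (m.drop s).drop (e + 1 - s))) false := by
        rw [← hdecomp]; rfl
    _ = runsAux ((m.drop s).take (e + 1 - s) ++ (m.drop s).drop (e + 1 - s)) false :=
        runsAux_prefix_false _ _ htakef
    _ = nruns ((m.drop s).take (e + 1 - s)) := by
        rw [runsAux_append]
        rw [runsAux_allfalse _ hdropf]
        simp [nruns]


-- flip_it as a map, and its effect on the mismatch list
lemma flip_it_map (s : List String) :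
    flip_it s = s.map (fun x => if x == "G" then "H" else "G") :=
  PySem.List.foldl_append_singleton_eq_map _ _ _

lemma flip_GH (l : List String) : ∀ x ∈ flip_it l, x = "G" ∨ x = "H" := by
  rw [flip_it_map]
  intro x hx
  rcases List.mem_map.mp hx with ⟨y, _, rfl⟩
  by_cases h : (y == "G") = true <;> simp [h]

lemma mismL_map_flip : ∀ (a b : List String),
    (∀ s ∈ a, s = "G" ∨ s = "H") → (∀ s ∈ b, s = "G" ∨ s = "H") →
    mismL a (b.map (fun x => if x == "G" then "H" else "G")) = (mismL a b).map (!·) := by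
  intro a
  induction a with
  | nil => intro b _ _; simp [mismL]
  | cons x xs ih =>
    intro b ha hb
    cases b with
    | nil => simp [mismL]
    | cons y ys =>
      have hx : x = "G" ∨ x = "H" := ha x (by simp)
      have hy : y = "G" ∨ y = "H" := hb y (by simp)
      have hhead : (!(x == (if y == "G" then "H" else "G"))) = (!(!(x == y))) := by
        rcases hx with rfl | rfl <;> rcases hy with rfl | rfl <;> decide
      simp only [List.map_cons, mismL, List.zipWith_cons_cons, hhead]
      exact congrArg _ (ih ys (fun s hs => ha s (by simp [hs])) (fun s hs => hb s (by simp [hs])))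

lemma mismL_window (a b : List String) (s k : Nat) :
    mismL ((a.drop s).take k) ((b.drop s).take k) = ((mismL a b).drop s).take k := by
  simp [mismL, List.take_zipWith, List.drop_zipWith]

-- B's fold computes the run count
lemma alt_foldl (l : List (String × String)) : ∀ (init : Int × Bool),
    (l.foldl
      (fun (st : Int × Bool) (p : String × String) =>
        let m : Bool := !(p.1 == p.2)
        (if m && !st.2 then st.1 + 1 else st.1, m))
      init).1
      = init.1 + (runsAux (l.map (fun q => !(q.1 == q.2))) init.2 : Int) := by
  induction l with
  | nil => intro init; simp [runsAux]
  | cons q t ih =>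
    intro init
    rw [List.foldl_cons, ih]
    simp only [List.map_cons, runsAux]
    split_ifs with h <;> push_cast <;> omega

lemma mismL_zip : ∀ (a b : List String), mismL a b = (a.zip b).map (fun q => !(q.1 == q.2)) := by
  intro a
  induction a with
  | nil => intro b; simp [mismL]
  | cons x xs ih =>
    intro b
    cases b with
    | nil => simp [mismL]
    | cons y ys =>
      simp only [mismL, List.zip_cons_cons, List.map_cons, List.zipWith_cons_cons]
      exact congrArg _ (ih ys)

lemma alt_eq (a b : List String) : sub_solve_alt a b = (nruns (mismL a b) : Int) := by
  unfold sub_solve_alt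
  rw [alt_foldl (a.zip b) (0, false), ← mismL_zip]
  simp [nruns]

-- windows of the mismatch list
lemma win_getD (m : List Bool) (s e j : Nat) (hse : s ≤ e) (hen : e < m.length)
    (hj : j < e + 1 - s) :
    ((m.drop s).take (e + 1 - s)).getD j false = m.getD (s + j) false := by
  have hwl : ((m.drop s).take (e + 1 - s)).length = e + 1 - s := by
    simp [List.length_take, List.length_drop]; omega
  have hjw : j < ((m.drop s).take (e + 1 - s)).length := by omega
  have hsj : s + j < m.length := by omega
  rw [List.getD_eq_getElem _ _ hjw, List.getD_eq_getElem _ _ hsj]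
  simp [List.getElem_take, List.getElem_drop]

-- main induction: A's fueled recursion computes the run count
lemma main_fuel : ∀ (fuel : Nat) (a b : List String), a.length ≤ b.length →
    ((∀ s ∈ a, s = "G" ∨ s = "H") ∧ (∀ s ∈ b.take a.length, s = "G" ∨ s = "H")
      ∨ (∃ w, w ≤ a.length ∧ ∀ i, i < a.length → a[i]? ≠ b[i]? → (w ≤ i ∧ i ≤ w + 1))) →
    nruns (mismL a b) < fuel → subSolveFuel fuel a b = (nruns (mismL a b) : Int) := by
  intro fuel
  induction fuel with
  | zero => intro a b _ _ h; omega
  | succ f ih =>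
    intro a b hLen hcond hfuel
    have hmlen : (mismL a b).length = a.length := by
      simp [mismL, List.length_zipWith]; omega
    cases hup : pvFindUp a b 0 with
    | none =>
      have hall := up_none a b 0 hup
      have hfalse : ∀ x ∈ mismL a b, x = false := by
        refine all_false_of_getD _ (fun j hj => ?_)
        rw [hmlen] at hj
        rw [← mm_getD a b j hj (by omega)]
        exact hall j (by omega) hj
      have h0 : nruns (mismL a b) = 0 := runsAux_allfalse _ hfalse false
      simp [subSolveFuel, hup, h0]
    | some st =>
      obtain ⟨-, hsl, hsm, hsfirst⟩ := up_some a b 0 st hup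
      cases hdown : pvFindDown a b (a.length - 1) st with
      | none =>
        exfalso
        have := down_none a b (a.length - 1) st hdown st (le_refl _) (by omega)
        simp [hsm] at this
      | some e =>
        obtain ⟨hse, hei, hem, hlast⟩ := down_some a b (a.length - 1) st e hdown
        have hel : e < a.length := by omega
        have hmem : ∀ j, j < a.length → pvMM a b j = (mismL a b).getD j false :=
          fun j hj => mm_getD a b j hj (by omega)
        have hsg : (mismL a b).getD st false = true := by rw [← hmem st hsl]; exact hsm
        have heg : (mismL a b).getD e false = true := by rw [← hmem e hel]; exact hem
        have hpre : ∀ j, j < st → (mismL a b).getD j false = false := fun j hj => by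
          rw [← hmem j (by omega)]; exact hsfirst j (by omega) hj
        have hpost : ∀ j, e < j → j < (mismL a b).length → (mismL a b).getD j false = false :=
          fun j h1 h2 => by
            rw [hmlen] at h2
            rw [← hmem j h2]
            exact hlast j h1 (by omega)
        have hwin := nruns_window (mismL a b) st e hse (by omega) hpre hpost
        have hwhead : (((mismL a b).drop st).take (e + 1 - st)).getD 0 false = true := by
          rw [win_getD (mismL a b) st e 0 hse (by omega) (by omega)]
          simpa using hsg
        have hwlen : (((mismL a b).drop st).take (e + 1 - st)).length = e + 1 - st := by
          simp [List.length_take, List.length_drop]; omega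
        have hwlast : (((mismL a b).drop st).take (e + 1 - st)).getLastD false = true := by
          rw [List.getLastD_eq_getLast?, List.getLast?_eq_getElem?]
          have : (((mismL a b).drop st).take (e + 1 - st)).getD ((((mismL a b).drop st).take (e + 1 - st)).length - 1) false = true := by
            rw [hwlen, show e + 1 - st - 1 = e - st from by omega,
              win_getD (mismL a b) st e (e - st) hse (by omega) (by omega),
              show st + (e - st) = e from by omega]
            exact heg
          exact this
        by_cases hcase : (e : Int) - (st : Int) < 2
        · have h1 : nruns (((mismL a b).drop st).take (e + 1 - st)) = 1 := by
            obtain ⟨t, hwt⟩ : ∃ t, ((mismL a b).drop st).take (e + 1 - st) = true :: t := by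
              cases hww : ((mismL a b).drop st).take (e + 1 - st) with
              | nil => rw [hww] at hwhead; simp at hwhead
              | cons x t =>
                rw [hww] at hwhead
                cases x
                · simp at hwhead
                · exact ⟨t, rfl⟩
            rw [hwt] at hwlen hwlast ⊢
            cases t with
            | nil => simp [nruns, runsAux]
            | cons y t2 =>
              have ht2 : t2 = [] := by
                simp at hwlen
                exact List.length_eq_zero_iff.mp (by omega)
              subst ht2
              have hy : y = true := by simpa using hwlast
              subst hy
              simp [nruns, runsAux]
          rw [hwin, h1]
          simp [subSolveFuel, hup, hdown, hcase]
        · -- recursive case: the span disjunct cannot reach here, so G/H alphabet holds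
          rcases hcond with ⟨ha, hb⟩ | ⟨w, hwle, hspan⟩
          swap
          · exfalso
            obtain ⟨h1, h2⟩ := hspan st hsl ((mm_ne a b st).mp hsm)
            obtain ⟨h3, h4⟩ := hspan e hel ((mm_ne a b e).mp hem)
            push_cast at hcase
            omega
          have hcast : ((e : Int) + 1) = ((e + 1 : Nat) : Int) := by push_cast; ring
          have hsliceA : PySem.List.slice a (some (st : Int)) (some ((e : Int) + 1))
              = (a.drop st).take (e + 1 - st) := by
            rw [hcast, PySem.List.slice_natCast]
          have hsliceB : PySem.List.slice b (some (st : Int)) (some ((e : Int) + 1))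
              = (b.drop st).take (e + 1 - st) := by
            rw [hcast, PySem.List.slice_natCast]
          have ha' : ∀ s ∈ (a.drop st).take (e + 1 - st), s = "G" ∨ s = "H" :=
            fun s hs => ha s (List.mem_of_mem_drop (List.mem_of_mem_take hs))
          have hbsub : (b.drop st).take (e + 1 - st)
              = ((b.take a.length).drop st).take (e + 1 - st) := by
            rw [List.drop_take, List.take_take]
            congr 1
            omega
          have hbs : ∀ s ∈ (b.drop st).take (e + 1 - st), s = "G" ∨ s = "H" := by
            rw [hbsub]
            exact fun s hs => hb s (List.mem_of_mem_drop (List.mem_of_mem_take hs))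
          have hmism' : mismL ((a.drop st).take (e + 1 - st)) (flip_it ((b.drop st).take (e + 1 - st)))
              = (((mismL a b).drop st).take (e + 1 - st)).map (!·) := by
            rw [flip_it_map, mismL_map_flip _ _ ha' hbs, mismL_window]
          have hlen' : ((a.drop st).take (e + 1 - st)).length
              = (flip_it ((b.drop st).take (e + 1 - st))).length := by
            rw [flip_it_map]
            simp [List.length_take, List.length_drop]
            omega
          have hflip := nruns_flip _ hwhead hwlast
          have hfuel' : nruns (mismL ((a.drop st).take (e + 1 - st)) (flip_it ((b.drop st).take (e + 1 - st)))) < f := by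
            rw [hmism']
            omega
          have hGH' : ∀ s ∈ (flip_it ((b.drop st).take (e + 1 - st))).take ((a.drop st).take (e + 1 - st)).length,
              s = "G" ∨ s = "H" :=
            fun s hs => flip_GH _ s (List.mem_of_mem_take hs)
          have hrec := ih _ _ (le_of_eq hlen') (Or.inl ⟨ha', hGH'⟩) hfuel'
          simp only [subSolveFuel, hup, hdown, Option.getD_some, if_neg hcase]
          rw [hsliceA, hsliceB, hrec, hmism', hwin]
          omega

theorem sub_solve_spec : Claim_equal_sub_solve := by
  intro a b _ hpre
  obtain ⟨hle, hcond⟩ := hpre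
  show sub_solve a b = sub_solve_alt a b
  unfold sub_solve
  rw [alt_eq]
  refine main_fuel (a.length + 1) a b hle hcond ?_
  have h1 := runsAux_le_length (mismL a b) false
  have h2 : (mismL a b).length = min a.length b.length := by simp [mismL, List.length_zipWith]
  simp only [nruns]
  omega
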